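-- pv_equiv track=rewrite | github.com/shinjipons/markdown-to-html | src/markdown/blog_post_generator.py | replace_link
-- ===== SOURCE A (Python) =====
-- def replace_link(text):
--     start = 0
--     result = ""
--     while True:
--         # Find the next markdown link
--         open_bracket = text.find('[', start)
--         if open_bracket == -1:
--             result += text[start:]
--             break
--
--         close_bracket = text.find(']', open_bracket)
--         open_paren = text.find('(', close_bracket)
--         close_paren = text.find(')', open_paren)
--
--         if -1 in (close_bracket, open_paren, close_paren):
--             result += text[start:]
--             break
--
--         # Extract link text and URL
--         link_text = text[open_bracket + 1:close_bracket]
--         link_url = text[open_paren + 1:close_paren]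
--
--         # Add text before the link and the converted link
--         result += text[start:open_bracket]
--         result += f'<a href="{link_url}" target="_blank">{link_text}</a>' # Make links open in new tab
--
--         # Move start to after this link
--         start = close_paren + 1
--     return result
-- ===== SOURCE B (Python) =====
-- def replace_link(text):
--     # One forward pass, character by character, driven by a 4-state automaton
--     # (outside / in link text / between ']' and '(' / in url) with buffers;
--     # no find() or slicing at all.
--     result = []
--     raw = []     # chars consumed since the pending '[' (fallback if the link never completes)
--     label = []
--     url = []
--     state = 0
--     for ch in text:
--         if state == 0:
--             if ch == '[':
--                 state, raw, label, url = 1, ['['], [], []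
--             else:
--                 result.append(ch)
--         elif state == 1:
--             raw.append(ch)
--             if ch == ']':
--                 state = 2
--             else:
--                 label.append(ch)
--         elif state == 2:
--             raw.append(ch)
--             if ch == '(':
--                 state = 3
--         else:
--             raw.append(ch)
--             if ch == ')':
--                 result.append('<a href="%s" target="_blank">%s</a>' % (''.join(url), ''.join(label)))
--                 state = 0
--             else:
--                 url.append(ch)
--     if state != 0:
--         result.extend(raw)
--     return ''.join(result)
-- ===== Notes on version B (the rewrite author's own statement) =====
-- stated objective: alternative
-- what changed: B is a single forward character-by-character pass driven by a 4-state automaton (outside / link text / between ] and ( / url) with explicit buffers, instead of A's repeated find() with start offsets plus slicing.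
import Mathlib
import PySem

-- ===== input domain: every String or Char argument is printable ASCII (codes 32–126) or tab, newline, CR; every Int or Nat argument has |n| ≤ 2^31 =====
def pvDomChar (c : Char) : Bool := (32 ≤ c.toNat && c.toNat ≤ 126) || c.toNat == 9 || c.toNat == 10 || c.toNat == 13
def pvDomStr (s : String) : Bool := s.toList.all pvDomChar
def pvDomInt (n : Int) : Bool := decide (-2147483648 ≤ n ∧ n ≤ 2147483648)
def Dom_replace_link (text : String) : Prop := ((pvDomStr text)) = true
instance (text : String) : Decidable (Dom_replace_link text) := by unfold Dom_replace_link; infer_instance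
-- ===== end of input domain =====

-- B replaces A's repeated find()-with-offset + slicing by a single forward character-by-character
-- pass driven by a 4-state automaton with explicit buffers; same return value (objective: alternative).

-- ===== PORT A =====
-- the while-loop of A, as recursion on fuel (fuel only makes the loop total; text.length+1 iterations always suffice,
-- since `start` strictly increases and stays ≤ len)
def loopA (cs : List Char) : Nat → Int → List Char → List Char
  | 0, _, result => result
  | fuel+1, start, result =>
    let ob := PySem.Chars.findFrom cs ['['] start none
    if ob = -1 then result ++ PySem.Chars.slice cs (some start) none
    else
      let cb := PySem.Chars.findFrom cs [']'] ob none
      let op := PySem.Chars.findFrom cs ['('] cb none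
      let cp := PySem.Chars.findFrom cs [')'] op none
      if cb = -1 ∨ op = -1 ∨ cp = -1 then result ++ PySem.Chars.slice cs (some start) none
      else
        loopA cs fuel (cp + 1) (result ++ PySem.Chars.slice cs (some start) (some ob)
          ++ "<a href=\"".toList ++ PySem.Chars.slice cs (some (op + 1)) (some cp)
          ++ "\" target=\"_blank\">".toList ++ PySem.Chars.slice cs (some (ob + 1)) (some cb)
          ++ "</a>".toList)

def replace_link (text : String) : String :=
  String.ofList (loopA text.toList (text.toList.length + 1) 0 [])

-- ===== PORT B =====
-- the f-string '<a href="{url}" target="_blank">{label}</a>'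
def anchor (label url : List Char) : List Char :=
  "<a href=\"".toList ++ url ++ "\" target=\"_blank\">".toList ++ label ++ "</a>".toList

-- B's for-loop: one char per step, state 0 = outside, 1 = in link text, 2 = between ']' and '(',
-- 3 = in url; `raw` buffers everything since the pending '[' for the end-of-string fallback.
def runB : List Char → Nat → List Char → List Char → List Char → List Char → List Char
  | [], st, res, raw, _, _ => if st ≠ 0 then res ++ raw else res
  | ch :: t, st, res, raw, label, url =>
    if st = 0 then
      if ch = '[' then runB t 1 res ['['] [] []
      else runB t 0 (res ++ [ch]) raw label url
    else if st = 1 then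
      if ch = ']' then runB t 2 res (raw ++ [ch]) label url
      else runB t 1 res (raw ++ [ch]) (label ++ [ch]) url
    else if st = 2 then
      if ch = '(' then runB t 3 res (raw ++ [ch]) label url
      else runB t 2 res (raw ++ [ch]) label url
    else
      if ch = ')' then runB t 0 (res ++ anchor label url) (raw ++ [ch]) label url
      else runB t 3 res (raw ++ [ch]) label (url ++ [ch])

def replace_link_alt (text : String) : String :=
  String.ofList (runB text.toList 0 [] [] [] [])

-- ===== PRECONDITION & SPEC =====
def Spec_replace_link (text : String) (out : String) : Prop := out = replace_link_alt text
instance (text : String) (out : String) : Decidable (Spec_replace_link text out) := by unfold Spec_replace_link; infer_instance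

-- ===== CLAIM (what is proved, stated in full; the proofs are below) =====
def Claim_equal_replace_link : Prop := ∀ (text : String), Dom_replace_link text → Spec_replace_link text (replace_link text)

-- ===== LEMMAS AND PROOFS =====

-- Proof-only intermediate: splitting at the first occurrence of a character.
def partChar (c : Char) : List Char → List Char × Bool × List Char
  | [] => ([], false, [])
  | a :: l =>
    if a = c then ([], true, l)
    else
      let p := partChar c l
      (a :: p.1, p.2.1, p.2.2)

lemma partChar_post_le (c : Char) (l : List Char) : (partChar c l).2.2.length ≤ l.length := by
  induction l with
  | nil => simp [partChar]
  | cons a l ih =>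
    simp only [partChar]
    split
    · simp
    · simpa using Nat.le_succ_of_le ih

lemma partChar_post_lt (c : Char) (l : List Char) (h : (partChar c l).2.1 = true) :
    (partChar c l).2.2.length < l.length := by
  induction l with
  | nil => simp [partChar] at h
  | cons a l ih =>
    simp only [partChar] at h ⊢
    split at h <;> rename_i hc
    · simp [hc]
    · have := ih (by simpa [hc] using h)
      simp [hc]
      omega

-- Proof-only intermediate loop (splitting semantics), bridging loopA and runB.
def altLoop (acc t : List Char) : List Char :=
  let p1 := partChar '[' t
  if _h1 : p1.2.1 = true then
    let p2 := partChar ']' p1.2.2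
    let p3 := partChar '(' p2.2.2
    let p4 := partChar ')' p3.2.2
    if p2.2.1 && p3.2.1 && p4.2.1 then
      altLoop (acc ++ p1.1 ++ "<a href=\"".toList ++ p4.1
        ++ "\" target=\"_blank\">".toList ++ p2.1 ++ "</a>".toList) p4.2.2
    else acc ++ p1.1 ++ '[' :: p1.2.2
  else acc ++ p1.1
termination_by t.length
decreasing_by
  calc (partChar ')' (partChar '(' (partChar ']' (partChar '[' t).2.2).2.2).2.2).2.2.length
      ≤ (partChar '(' (partChar ']' (partChar '[' t).2.2).2.2).2.2.length := partChar_post_le _ _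
    _ ≤ (partChar ']' (partChar '[' t).2.2).2.2.length := partChar_post_le _ _
    _ ≤ (partChar '[' t).2.2.length := partChar_post_le _ _
    _ < t.length := partChar_post_lt _ _ _h1

lemma infix_singleton_iff (d : Char) (l : List Char) : [d] <:+: l ↔ d ∈ l := by
  constructor
  · rintro ⟨s, t, rfl⟩; simp
  · intro h
    obtain ⟨s, t, rfl⟩ := List.append_of_mem h
    exact ⟨s, t, by simp⟩

lemma find_cons_singleton (a d : Char) (l : List Char) :
    PySem.Chars.find (a :: l) [d] =
      if a = d then 0
      else if PySem.Chars.find l [d] = -1 then -1 else 1 + PySem.Chars.find l [d] := by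
  by_cases had : a = d
  · subst had
    rw [if_pos rfl]
    have hinf : [a] <:+: (a :: l) := ⟨[], l, by simp⟩
    have h0 : 0 ≤ PySem.Chars.find (a :: l) [a] := (PySem.Chars.find_nonneg_iff _ _).mpr hinf
    obtain ⟨hpre, hmin⟩ := PySem.Chars.find_spec h0
    have hz : (PySem.Chars.find (a :: l) [a]).toNat = 0 := by
      by_contra hne
      exact hmin 0 (Nat.pos_of_ne_zero hne) ⟨l, by simp⟩
    omega
  · simp only [if_neg had]
    by_cases hfl : PySem.Chars.find l [d] = -1
    · simp only [if_pos hfl]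
      rw [PySem.Chars.find_eq_neg_one_iff] at hfl ⊢
      rw [infix_singleton_iff] at hfl ⊢
      simp [Ne.symm had, hfl]
    · simp only [if_neg hfl]
      have hl0 : 0 ≤ PySem.Chars.find l [d] := by
        have := PySem.Chars.neg_one_le_find l [d]; omega
      obtain ⟨hpre, hmin⟩ := PySem.Chars.find_spec hl0
      have hmem : d ∈ l := by
        obtain ⟨t, ht⟩ := hpre
        exact List.drop_subset _ _ (by rw [← ht]; simp)
      have h0 : 0 ≤ PySem.Chars.find (a :: l) [d] :=
        (PySem.Chars.find_nonneg_iff _ _).mpr ((infix_singleton_iff _ _).mpr (List.mem_cons_of_mem a hmem))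
      obtain ⟨hpre', hmin'⟩ := PySem.Chars.find_spec h0
      have hfz : (PySem.Chars.find (a :: l) [d]).toNat ≠ 0 := by
        intro hz
        rw [hz] at hpre'
        obtain ⟨t, ht⟩ := hpre'
        simp at ht
        exact had ht.1.symm
      have hge : (PySem.Chars.find l [d]).toNat + 1 ≤ (PySem.Chars.find (a :: l) [d]).toNat := by
        obtain ⟨j, hj⟩ : ∃ j, (PySem.Chars.find (a :: l) [d]).toNat = j + 1 :=
          ⟨(PySem.Chars.find (a :: l) [d]).toNat - 1, by omega⟩
        rw [hj] at hpre'
        rw [List.drop_succ_cons] at hpre'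
        by_contra hlt
        exact hmin j (by omega) hpre'
      have hle : (PySem.Chars.find (a :: l) [d]).toNat ≤ (PySem.Chars.find l [d]).toNat + 1 := by
        by_contra hgt
        exact hmin' ((PySem.Chars.find l [d]).toNat + 1) (by omega)
          (by rw [List.drop_succ_cons]; exact hpre)
      omega

-- partChar found: splits at the first occurrence, which is where find points
lemma partChar_found (c : Char) (l : List Char) (h : (partChar c l).2.1 = true) :
    l = (partChar c l).1 ++ c :: (partChar c l).2.2 ∧
      PySem.Chars.find l [c] = ((partChar c l).1.length : Int) := by
  induction l with
  | nil => simp [partChar] at h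
  | cons a l ih =>
    rw [find_cons_singleton]
    simp only [partChar] at h ⊢
    by_cases hc : a = c
    · subst hc
      simp
    · simp only [if_neg hc] at h ⊢
      obtain ⟨hsplit, hfind⟩ := ih (by simpa using h)
      constructor
      · simpa using hsplit
      · rw [hfind]
        have : ((partChar c l).1.length : Int) ≠ -1 := by omega
        simp only [if_neg this, List.length_cons]
        push_cast
        ring

lemma partChar_notfound (c : Char) (l : List Char) (h : (partChar c l).2.1 = false) :
    PySem.Chars.find l [c] = -1 ∧ (partChar c l).1 = l := by
  induction l with
  | nil =>
    refine ⟨?_, by simp [partChar]⟩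
    rw [PySem.Chars.find_eq_neg_one_iff, infix_singleton_iff]
    simp
  | cons a l ih =>
    simp only [partChar] at h ⊢
    by_cases hc : a = c
    · simp [hc] at h
    · simp only [if_neg hc] at h ⊢
      obtain ⟨hfind, hpre⟩ := ih (by simpa using h)
      refine ⟨?_, by simp [hpre]⟩
      rw [find_cons_singleton, if_neg hc, if_pos hfind]

lemma drop_of_drop_cons {cs r : List Char} {a : Char} {n : Nat} (h : cs.drop n = a :: r) :
    cs.drop (n + 1) = r := by
  rw [← List.drop_drop (j := n) (i := 1), h]
  rfl

lemma loop_eq (cs : List Char) (fuel : Nat) : ∀ (k : Nat) (result : List Char),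
    k ≤ cs.length → cs.length - k < fuel →
    loopA cs fuel (k : Int) result = altLoop result (cs.drop k) := by
  induction fuel with
  | zero => intro k result hk hf; omega
  | succ fuel ih =>
    intro k result hk hf
    simp only [loopA]
    rw [PySem.Chars.findFrom_natCast cs ['['] k hk]
    rcases hP1 : partChar '[' (cs.drop k) with ⟨pre, f1, r1⟩
    cases f1 with
    | false =>
      have h1 := partChar_notfound '[' (cs.drop k) (by rw [hP1])
      rw [hP1] at h1
      obtain ⟨hf1, hpre1⟩ := h1
      rw [if_pos hf1, if_pos rfl]
      conv_rhs => rw [altLoop]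
      simp only [hP1] at *
      simp [hpre1, PySem.Chars.slice_eq_listSlice, PySem.List.slice_from_natCast]
    | true =>
      have h1 := partChar_found '[' (cs.drop k) (by rw [hP1])
      rw [hP1] at h1
      obtain ⟨hsplit1, hfind1⟩ := h1
      simp only at hsplit1 hfind1
      have hlen1 : cs.length - k = pre.length + 1 + r1.length := by
        have h := congrArg List.length hsplit1
        simp [List.length_drop] at h
        omega
      rw [hfind1]
      rw [if_neg (show ¬((pre.length : Int) = -1) by omega)]
      rw [if_neg (show ¬((k : Int) + (pre.length : Int) = -1) by omega)]
      have hdropj : cs.drop (k + pre.length) = '[' :: r1 := by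
        rw [← List.drop_drop (j := k) (i := pre.length), hsplit1, List.drop_left]
      rw [show ((k : Int) + (pre.length : Int)) = ((k + pre.length : Nat) : Int) by push_cast; ring]
      rw [PySem.Chars.findFrom_natCast cs [']'] (k + pre.length) (by omega)]
      rw [hdropj, find_cons_singleton, if_neg (by decide : ¬('[' = ']'))]
      rcases hP2 : partChar ']' r1 with ⟨label, f2, r2⟩
      cases f2 with
      | false =>
        have h2 := partChar_notfound ']' r1 (by rw [hP2])
        rw [hP2] at h2
        rw [if_pos h2.1]
        rw [show (if (-1 : Int) = -1 then (-1 : Int) else ((k + pre.length : Nat) : Int) + -1) = -1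
          from if_pos rfl]
        rw [if_pos (Or.inl rfl)]
        conv_rhs => rw [altLoop]
        simp only [hP1, hP2]
        simp [hsplit1, PySem.Chars.slice_eq_listSlice, PySem.List.slice_from_natCast]
      | true =>
        have h2 := partChar_found ']' r1 (by rw [hP2])
        rw [hP2] at h2
        obtain ⟨hsplit2, hfind2⟩ := h2
        simp only at hsplit2 hfind2
        rw [hfind2, if_neg (show ¬((label.length : Int) = -1) by omega)]
        rw [if_neg (show ¬((1 : Int) + (label.length : Int) = -1) by omega)]
        have hdropj1 : cs.drop (k + pre.length + 1) = r1 := drop_of_drop_cons hdropj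
        have hdropm : cs.drop (k + pre.length + 1 + label.length) = ']' :: r2 := by
          rw [← List.drop_drop (j := k + pre.length + 1) (i := label.length), hdropj1, hsplit2,
            List.drop_left]
        have hlen2 : r1.length = label.length + 1 + r2.length := by
          have h := congrArg List.length hsplit2; simp at h; omega
        rw [show ((k + pre.length : Nat) : Int) + (1 + (label.length : Int))
              = ((k + pre.length + 1 + label.length : Nat) : Int) by push_cast; ring]
        rw [PySem.Chars.findFrom_natCast cs ['('] (k + pre.length + 1 + label.length) (by omega)]
        rw [hdropm, find_cons_singleton, if_neg (by decide : ¬(']' = '('))]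
        rcases hP3 : partChar '(' r2 with ⟨mid, f3, r3⟩
        cases f3 with
        | false =>
          have h3 := partChar_notfound '(' r2 (by rw [hP3])
          rw [hP3] at h3
          rw [if_pos h3.1]
          rw [show (if (-1 : Int) = -1 then (-1 : Int)
              else ((k + pre.length + 1 + label.length : Nat) : Int) + -1) = -1 from if_pos rfl]
          rw [if_pos (Or.inr (Or.inl rfl))]
          conv_rhs => rw [altLoop]
          simp only [hP1, hP2, hP3]
          simp [hsplit1, PySem.Chars.slice_eq_listSlice, PySem.List.slice_from_natCast]
        | true =>
          have h3 := partChar_found '(' r2 (by rw [hP3])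
          rw [hP3] at h3
          obtain ⟨hsplit3, hfind3⟩ := h3
          simp only at hsplit3 hfind3
          rw [hfind3, if_neg (show ¬((mid.length : Int) = -1) by omega)]
          rw [if_neg (show ¬((1 : Int) + (mid.length : Int) = -1) by omega)]
          have hdropm1 : cs.drop (k + pre.length + 1 + label.length + 1) = r2 :=
            drop_of_drop_cons hdropm
          have hdropq : cs.drop (k + pre.length + 1 + label.length + 1 + mid.length)
              = '(' :: r3 := by
            rw [← List.drop_drop (j := k + pre.length + 1 + label.length + 1) (i := mid.length),
              hdropm1, hsplit3, List.drop_left]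
          have hlen3 : r2.length = mid.length + 1 + r3.length := by
            have h := congrArg List.length hsplit3; simp at h; omega
          rw [show ((k + pre.length + 1 + label.length : Nat) : Int) + (1 + (mid.length : Int))
                = ((k + pre.length + 1 + label.length + 1 + mid.length : Nat) : Int) by
              push_cast; ring]
          rw [PySem.Chars.findFrom_natCast cs [')']
            (k + pre.length + 1 + label.length + 1 + mid.length) (by omega)]
          rw [hdropq, find_cons_singleton, if_neg (by decide : ¬('(' = ')'))]
          rcases hP4 : partChar ')' r3 with ⟨url, f4, r4⟩
          cases f4 with
          | false =>
            have h4 := partChar_notfound ')' r3 (by rw [hP4])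
            rw [hP4] at h4
            rw [if_pos h4.1]
            rw [show (if (-1 : Int) = -1 then (-1 : Int)
                else ((k + pre.length + 1 + label.length + 1 + mid.length : Nat) : Int) + -1) = -1
              from if_pos rfl]
            rw [if_pos (Or.inr (Or.inr rfl))]
            conv_rhs => rw [altLoop]
            simp only [hP1, hP2, hP3, hP4]
            simp [hsplit1, PySem.Chars.slice_eq_listSlice, PySem.List.slice_from_natCast]
          | true =>
            have h4 := partChar_found ')' r3 (by rw [hP4])
            rw [hP4] at h4
            obtain ⟨hsplit4, hfind4⟩ := h4
            simp only at hsplit4 hfind4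
            rw [hfind4, if_neg (show ¬((url.length : Int) = -1) by omega)]
            rw [if_neg (show ¬((1 : Int) + (url.length : Int) = -1) by omega)]
            have hdropq1 : cs.drop (k + pre.length + 1 + label.length + 1 + mid.length + 1) = r3 :=
              drop_of_drop_cons hdropq
            have hdropt : cs.drop (k + pre.length + 1 + label.length + 1 + mid.length + 1
                + url.length) = ')' :: r4 := by
              rw [← List.drop_drop
                (j := k + pre.length + 1 + label.length + 1 + mid.length + 1) (i := url.length),
                hdropq1, hsplit4, List.drop_left]
            have hlen4 : r3.length = url.length + 1 + r4.length := by
              have h := congrArg List.length hsplit4; simp at h; omega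
            rw [show ((k + pre.length + 1 + label.length + 1 + mid.length : Nat) : Int)
                  + (1 + (url.length : Int))
                  = ((k + pre.length + 1 + label.length + 1 + mid.length + 1
                      + url.length : Nat) : Int)
                by push_cast; ring]
            rw [if_neg (show ¬(((k + pre.length + 1 + label.length : Nat) : Int) = -1 ∨
                ((k + pre.length + 1 + label.length + 1 + mid.length : Nat) : Int) = -1 ∨
                ((k + pre.length + 1 + label.length + 1 + mid.length + 1
                    + url.length : Nat) : Int) = -1) by push_cast; omega)]
            have hlent : cs.length - (k + pre.length + 1 + label.length + 1 + mid.length + 1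
                + url.length) = r4.length + 1 := by
              have h := congrArg List.length hdropt
              simp [List.length_drop] at h
              omega
            conv_rhs => rw [altLoop]
            simp only [hP1, hP2, hP3, hP4]
            rw [show ((k + pre.length + 1 + label.length + 1 + mid.length + 1
                  + url.length : Nat) : Int) + 1
                = ((k + pre.length + 1 + label.length + 1 + mid.length + 1 + url.length
                    + 1 : Nat) : Int) by push_cast; ring]
            rw [ih _ _ (by omega) (by omega)]
            rw [drop_of_drop_cons hdropt]
            rw [show ((k + pre.length : Nat) : Int) + 1 = ((k + pre.length + 1 : Nat) : Int) by
              push_cast; ring]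
            rw [show ((k + pre.length + 1 + label.length + 1 + mid.length : Nat) : Int) + 1
                = ((k + pre.length + 1 + label.length + 1 + mid.length + 1 : Nat) : Int) by
              push_cast; ring]
            simp only [PySem.Chars.slice_eq_listSlice, PySem.List.slice_natCast]
            rw [show k + pre.length - k = pre.length by omega]
            rw [show k + pre.length + 1 + label.length - (k + pre.length + 1) = label.length by
              omega]
            rw [show k + pre.length + 1 + label.length + 1 + mid.length + 1 + url.length
                - (k + pre.length + 1 + label.length + 1 + mid.length + 1) = url.length by omega]
            rw [hdropj1, hdropq1, hsplit1, List.take_left, hsplit2, List.take_left, hsplit4,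
              List.take_left]
            simp [List.append_assoc]

-- runB in each non-final state, expressed through partChar
lemma run0_part (t : List Char) (res raw label url : List Char) :
    runB t 0 res raw label url =
      if (partChar '[' t).2.1 then runB (partChar '[' t).2.2 1 (res ++ (partChar '[' t).1) ['['] [] []
      else res ++ (partChar '[' t).1 := by
  induction t generalizing res raw label url with
  | nil => simp [runB, partChar]
  | cons a t ih =>
    by_cases ha : a = '['
    · simp [runB, partChar, ha]
    · simp only [runB, partChar, if_neg ha]
      norm_num
      rw [ih]
      split <;> simp

lemma run1_part (t : List Char) (res raw label url : List Char) :
    runB t 1 res raw label url =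
      if (partChar ']' t).2.1 then
        runB (partChar ']' t).2.2 2 res (raw ++ (partChar ']' t).1 ++ [']'])
          (label ++ (partChar ']' t).1) url
      else res ++ raw ++ t := by
  induction t generalizing res raw label url with
  | nil => simp [runB, partChar]
  | cons a t ih =>
    by_cases ha : a = ']'
    · simp [runB, partChar, ha]
    · simp only [runB, partChar, if_neg ha]
      norm_num
      rw [ih]
      split <;> simp

lemma run2_part (t : List Char) (res raw label url : List Char) :
    runB t 2 res raw label url =
      if (partChar '(' t).2.1 then
        runB (partChar '(' t).2.2 3 res (raw ++ (partChar '(' t).1 ++ ['(']) label url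
      else res ++ raw ++ t := by
  induction t generalizing res raw label url with
  | nil => simp [runB, partChar]
  | cons a t ih =>
    by_cases ha : a = '('
    · simp [runB, partChar, ha]
    · simp only [runB, partChar, if_neg ha]
      norm_num
      rw [ih]
      split <;> simp

lemma run3_part (t : List Char) (res raw label url : List Char) :
    runB t 3 res raw label url =
      if (partChar ')' t).2.1 then
        runB (partChar ')' t).2.2 0 (res ++ anchor label (url ++ (partChar ')' t).1))
          (raw ++ (partChar ')' t).1 ++ [')']) label (url ++ (partChar ')' t).1)
      else res ++ raw ++ t := by
  induction t generalizing res raw label url with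
  | nil => simp [runB, partChar]
  | cons a t ih =>
    by_cases ha : a = ')'
    · simp [runB, partChar, ha]
    · simp only [runB, partChar, if_neg ha]
      norm_num
      rw [ih]
      split <;> simp

-- state 0 of runB ignores raw/label/url; it computes exactly altLoop
lemma runB_eq_altLoop_aux (n : Nat) : ∀ (t : List Char), t.length ≤ n →
    ∀ (res raw label url : List Char),
    runB t 0 res raw label url = altLoop res t := by
  induction n with
  | zero =>
    intro t ht res raw label url
    have : t = [] := List.eq_nil_of_length_eq_zero (Nat.le_zero.mp ht)
    subst this
    simp [runB, altLoop, partChar]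
  | succ n ihn =>
    intro t ht res raw label url
    rw [run0_part, altLoop]
    rcases hP1 : partChar '[' t with ⟨pre, f1, r1⟩
    cases f1 with
    | false => simp
    | true =>
      simp only [if_pos rfl]
      have hs1 := (partChar_found '[' t (by rw [hP1])).1
      rw [hP1] at hs1; simp only at hs1
      rw [run1_part]
      rcases hP2 : partChar ']' r1 with ⟨label2, f2, r2⟩
      cases f2 with
      | false => simp [hs1]
      | true =>
        simp only [if_pos rfl]
        have hs2 := (partChar_found ']' r1 (by rw [hP2])).1
        rw [hP2] at hs2; simp only at hs2
        rw [run2_part]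
        rcases hP3 : partChar '(' r2 with ⟨mid, f3, r3⟩
        cases f3 with
        | false => simp [hs1, hs2]
        | true =>
          simp only [if_pos rfl]
          have hs3 := (partChar_found '(' r2 (by rw [hP3])).1
          rw [hP3] at hs3; simp only at hs3
          rw [run3_part]
          rcases hP4 : partChar ')' r3 with ⟨url2, f4, r4⟩
          cases f4 with
          | false => simp [hs1, hs2, hs3]
          | true =>
            simp only [if_pos rfl, Bool.and_self]
            have hlt : r4.length < t.length := by
              have h4 : r4.length < r3.length := by
                have := partChar_post_lt ')' r3 (by rw [hP4]); rw [hP4] at this; exact this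
              have h3 : r3.length ≤ r2.length := by
                have := partChar_post_le '(' r2; rw [hP3] at this; exact this
              have h2 : r2.length ≤ r1.length := by
                have := partChar_post_le ']' r1; rw [hP2] at this; exact this
              have h1 : r1.length < t.length := by
                have := partChar_post_lt '[' t (by rw [hP1]); rw [hP1] at this; exact this
              omega
            rw [ihn r4 (by omega)]
            simp [anchor, List.append_assoc]

-- ===== VERDICT (by name: the statement is the Claim_ definition above) =====
theorem replace_link_spec : Claim_equal_replace_link := by
  intro text _
  show replace_link text = replace_link_alt text
  unfold replace_link replace_link_alt
  have h := loop_eq text.toList (text.toList.length + 1) 0 [] (by omega) (by omega)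
  simp only [Nat.cast_zero] at h
  rw [h, List.drop_zero, runB_eq_altLoop_aux text.toList.length text.toList le_rfl]
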